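-- pv_equiv track=rewrite | github.com/Boomlive-ai/IFN-get-receipe-from-fridge-items | tools/tools.py | _is_non_vegan_recipe
-- ===== SOURCE A (Python) =====
-- def _is_non_vegan_recipe(dish_name: str, ingredients: list) -> bool:
--     """Check if a recipe contains non-vegan ingredients."""
--     non_vegan_keywords = [
--         # All non-veg keywords
--         "chicken", "mutton", "lamb", "goat", "pork", "beef", "meat", "keema",
--         "fish", "prawn", "shrimp", "crab", "lobster", "squid", "egg", "anda",
--         "murgh", "gosht", "jhinga", "machhi", "machi", "machli",
--         # Dairy and animal products
--         "milk", "cream", "butter", "ghee", "paneer", "cheese", "curd", "yogurt",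
--         "yoghurt", "dahi", "khoya", "mawa", "malai", "whey",
--         "honey", "gelatin",
--     ]
--     name_lower = dish_name.lower()
--     for keyword in non_vegan_keywords:
--         if keyword in name_lower:
--             return True
--     for ing in ingredients:
--         ing_lower = ing.lower()
--         for keyword in non_vegan_keywords:
--             if keyword in ing_lower:
--                 return True
--     return False
-- ===== SOURCE B (Python) =====
-- _NON_VEGAN_KEYWORDS = [
--     "chicken", "mutton", "lamb", "goat", "pork", "beef", "meat", "keema",
--     "fish", "prawn", "shrimp", "crab", "lobster", "squid", "egg", "anda",
--     "murgh", "gosht", "jhinga", "machhi", "machi", "machli",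
--     "milk", "cream", "butter", "ghee", "paneer", "cheese", "curd", "yogurt",
--     "yoghurt", "dahi", "khoya", "mawa", "malai", "whey",
--     "honey", "gelatin",
-- ]
--
--
-- def _contains_non_vegan(s):
--     # position-major scan: at each position of the lowered string, test whether
--     # any keyword starts there (one left-to-right sweep, like a combined automaton)
--     t = s.lower()
--     return any(t.startswith(k, i) for i in range(len(t) + 1) for k in _NON_VEGAN_KEYWORDS)
--
--
-- def _is_non_vegan_recipe(dish_name: str, ingredients: list) -> bool:
--     """Check if a recipe contains non-vegan ingredients."""
--     return _contains_non_vegan(dish_name) or any(_contains_non_vegan(ing) for ing in ingredients)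
-- ===== Notes on version B (the rewrite author's own statement) =====
-- stated objective: alternative
-- what changed: Replaces the keyword-major loops (for each of 38 keywords, a full substring search per string) by a position-major single left-to-right sweep of each lowered string, testing at each position whether some keyword starts there, with the two phases fused into one boolean expression.
import Mathlib
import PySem

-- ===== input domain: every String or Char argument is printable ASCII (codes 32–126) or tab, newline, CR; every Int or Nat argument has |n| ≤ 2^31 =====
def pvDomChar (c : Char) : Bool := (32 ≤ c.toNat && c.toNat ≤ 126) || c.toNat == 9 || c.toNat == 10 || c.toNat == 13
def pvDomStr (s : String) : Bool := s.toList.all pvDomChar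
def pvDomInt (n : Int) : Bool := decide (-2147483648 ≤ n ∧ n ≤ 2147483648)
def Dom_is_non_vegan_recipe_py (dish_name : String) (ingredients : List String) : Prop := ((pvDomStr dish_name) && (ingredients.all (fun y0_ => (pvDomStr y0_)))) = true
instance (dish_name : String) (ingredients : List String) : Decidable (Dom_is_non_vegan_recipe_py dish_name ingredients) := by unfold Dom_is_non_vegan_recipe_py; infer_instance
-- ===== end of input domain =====

-- B replaces A's keyword-major loops (per keyword, a substring search) by one
-- position-major left-to-right sweep of each lowered string (objective: alternative).

-- the keyword list (shared literal data of both programs)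
def pvNonVeganKeywords : List String := [
  "chicken", "mutton", "lamb", "goat", "pork", "beef", "meat", "keema",
  "fish", "prawn", "shrimp", "crab", "lobster", "squid", "egg", "anda",
  "murgh", "gosht", "jhinga", "machhi", "machi", "machli",
  "milk", "cream", "butter", "ghee", "paneer", "cheese", "curd", "yogurt",
  "yoghurt", "dahi", "khoya", "mawa", "malai", "whey",
  "honey", "gelatin"]

-- ===== PORT A =====
-- the early-return 'for' loops are the obvious List.any
def is_non_vegan_recipe_py (dish_name : String) (ingredients : List String) : Bool :=
  let name_lower := PySem.Str.lower dish_name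
  if pvNonVeganKeywords.any (fun keyword => PySem.Str.isIn keyword name_lower) then true
  else
    ingredients.any (fun ing =>
      let ing_lower := PySem.Str.lower ing
      pvNonVeganKeywords.any (fun keyword => PySem.Str.isIn keyword ing_lower))

-- ===== PORT B =====
-- t.startswith(k, i) for 0 ≤ i ≤ len(t) is exactly 'k is a prefix of t[i:]',
-- ported as PySem.Chars.startswith (t.drop i) k.toList
def pvContainsNonVegan (s : String) : Bool :=
  let t := (PySem.Str.lower s).toList
  (List.range (t.length + 1)).any (fun i =>
    pvNonVeganKeywords.any (fun k => PySem.Chars.startswith (t.drop i) k.toList))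

def is_non_vegan_recipe_py_alt (dish_name : String) (ingredients : List String) : Bool :=
  pvContainsNonVegan dish_name || ingredients.any pvContainsNonVegan

-- ===== PRECONDITION & SPEC =====
def Spec_is_non_vegan_recipe_py (dish_name : String) (ingredients : List String) (out : Bool) : Prop := out = is_non_vegan_recipe_py_alt dish_name ingredients
instance (dish_name : String) (ingredients : List String) (out : Bool) : Decidable (Spec_is_non_vegan_recipe_py dish_name ingredients out) := by unfold Spec_is_non_vegan_recipe_py; infer_instance

-- ===== CLAIM (what is proved, stated in full; the proofs are below) =====
def Claim_equal_is_non_vegan_recipe_py : Prop := ∀ (dish_name : String) (ingredients : List String), Dom_is_non_vegan_recipe_py dish_name ingredients → Spec_is_non_vegan_recipe_py dish_name ingredients (is_non_vegan_recipe_py dish_name ingredients)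

-- ===== LEMMAS AND PROOFS =====

theorem pvKeyword_ne_nil : ∀ k ∈ pvNonVeganKeywords, k.toList ≠ [] := by decide

-- the position-major sweep finds a keyword iff some keyword is a substring
theorem pvScan_eq (t : List Char) :
    (List.range (t.length + 1)).any (fun i =>
        pvNonVeganKeywords.any (fun k => PySem.Chars.startswith (t.drop i) k.toList))
      = pvNonVeganKeywords.any (fun k => PySem.Chars.isIn k.toList t) := by
  rw [Bool.eq_iff_iff]
  simp only [List.any_eq_true, List.mem_range, PySem.Chars.startswith_iff,
    ← PySem.Chars.exists_prefix_drop_iff_isIn]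
  constructor
  · rintro ⟨i, _, k, hk, hp⟩
    exact ⟨k, hk, i, hp⟩
  · rintro ⟨k, hk, j, hp⟩
    by_cases hj : j ≤ t.length
    · exact ⟨j, by omega, k, hk, hp⟩
    · exfalso
      rw [List.drop_eq_nil_iff.mpr (by omega)] at hp
      exact pvKeyword_ne_nil k hk (List.prefix_nil.mp hp)

theorem pvContains_eq (s : String) :
    pvContainsNonVegan s
      = pvNonVeganKeywords.any (fun k => PySem.Str.isIn k (PySem.Str.lower s)) := by
  unfold pvContainsNonVegan
  rw [pvScan_eq]
  simp [PySem.Str.isIn_eq]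

-- ===== VERDICT (by name: the statement is the Claim_ definition above) =====
theorem is_non_vegan_recipe_py_spec : Claim_equal_is_non_vegan_recipe_py := by
  intro dish_name ingredients _
  show is_non_vegan_recipe_py dish_name ingredients
      = is_non_vegan_recipe_py_alt dish_name ingredients
  unfold is_non_vegan_recipe_py is_non_vegan_recipe_py_alt
  rw [pvContains_eq,
    PySem.List.any_congr_mem (l := ingredients) (f := pvContainsNonVegan) (fun x _ => pvContains_eq x)]
  cases hC : pvNonVeganKeywords.any (fun k => PySem.Str.isIn k (PySem.Str.lower dish_name))
  · simp only [hC, Bool.false_eq_true, if_false, Bool.false_or]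
  · simp only [hC, if_true, Bool.true_or]
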